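-- pv_equiv track=rewrite | github.com/philophilo/dockerize | yummy_api/app/serializer.py | check_empty_spaces
-- ===== SOURCE A (Python) =====
-- def check_empty_spaces(string):
--     """ Check if a string still has any empty spaces"""
--     if not (isinstance(string, str)):
--         return False, ' is not a string'
--     string = string.strip()
--     split_string = string.split(" ")
--     number_of_splits = len(split_string)
--     empty_chunks = 0
--     for i in split_string:
--         if len(i) == 0:
--             empty_chunks += 1
--     if empty_chunks == number_of_splits:
--         return False, ' is empty'
--     return True, string
-- ===== SOURCE B (Python) =====
-- def check_empty_spaces(string):
--     """ Check if a string still has any empty spaces"""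
--     if not (isinstance(string, str)):
--         return False, ' is not a string'
--     string = string.strip()
--     if string == '':
--         return False, ' is empty'
--     return True, string
-- ===== Notes on version B (the rewrite author's own statement) =====
-- stated objective: simpler
-- what changed: Replaced the split-on-space list plus the chunk-counting loop and count comparison with a single emptiness test on the stripped string (all chunks are empty iff the stripped string is empty), removing the list materialization and the scan.
import Mathlib
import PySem

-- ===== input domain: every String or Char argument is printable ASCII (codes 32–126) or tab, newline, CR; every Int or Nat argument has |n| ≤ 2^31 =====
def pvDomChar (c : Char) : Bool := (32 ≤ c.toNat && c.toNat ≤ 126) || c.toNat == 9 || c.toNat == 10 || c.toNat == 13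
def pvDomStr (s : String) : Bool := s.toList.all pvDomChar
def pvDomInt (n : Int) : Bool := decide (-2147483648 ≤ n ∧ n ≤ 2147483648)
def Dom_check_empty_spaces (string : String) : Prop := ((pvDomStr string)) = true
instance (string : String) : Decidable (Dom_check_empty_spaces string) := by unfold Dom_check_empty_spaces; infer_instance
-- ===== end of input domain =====

-- B replaces A's split-on-space list and chunk-counting loop with a single emptiness test
-- on the stripped string (objective: simpler; return value proved identical).

-- ===== PORT A =====
def check_empty_spaces (string : String) : Bool × String :=
  let s : String := PySem.Str.strip string
  -- string.split(" "): sep = " " is nonempty, so Python's split is Chars.splitOn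
  let split_string : List String :=
    (PySem.Chars.splitOn s.toList " ".toList).map String.ofList
  let number_of_splits : Int := (split_string.length : Int)
  let empty_chunks : Int :=
    split_string.foldl (fun acc i => if PySem.Str.len i = 0 then acc + 1 else acc) 0
  if empty_chunks = number_of_splits then (false, " is empty") else (true, s)

-- ===== PORT B =====
def check_empty_spaces_alt (string : String) : Bool × String :=
  let s : String := PySem.Str.strip string
  if s = "" then (false, " is empty") else (true, s)

-- ===== PRECONDITION & SPEC =====
def Spec_check_empty_spaces (string : String) (out : Bool × String) : Prop := out = check_empty_spaces_alt string
instance (string : String) (out : Bool × String) : Decidable (Spec_check_empty_spaces string out) := by unfold Spec_check_empty_spaces; infer_instance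

-- ===== CLAIM (what is proved, stated in full; the proofs are below) =====
def Claim_equal_check_empty_spaces : Prop := ∀ (string : String), Dom_check_empty_spaces string → Spec_check_empty_spaces string (check_empty_spaces string)

-- ===== LEMMAS AND PROOFS =====

-- the counting loop of A computes n plus the number of empty chunks
theorem pv_foldl_count (l : List String) (n : Int) :
    l.foldl (fun acc i => if PySem.Str.len i = 0 then acc + 1 else acc) n
      = n + (l.countP (fun i => decide (PySem.Str.len i = 0)) : Int) := by
  induction l generalizing n with
  | nil => simp
  | cons x xs ih =>
    simp only [List.foldl_cons, List.countP_cons, ih]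
    by_cases h : x = "" <;> simp [h] <;> omega

-- anything already in the accumulator ends up in splitOn.go's result
theorem pv_go_acc_mem (sep : List Char) (fuel : Nat) (l cur : List Char)
    (acc : List (List Char)) (x : List Char) (hx : x ∈ acc) :
    x ∈ PySem.Chars.splitOn.go sep fuel l cur acc := by
  induction fuel generalizing l cur acc with
  | zero => simp [PySem.Chars.splitOn.go]; tauto
  | succ f ih =>
    cases l with
    | nil => simp [PySem.Chars.splitOn.go]; tauto
    | cons c rest =>
      rw [PySem.Chars.splitOn.go]
      split
      · exact ih _ _ _ (List.mem_cons_of_mem _ hx)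
      · exact ih _ _ _ hx

-- splitOn.go always yields a chunk that extends the current accumulator cur
theorem pv_go_exists (sep : List Char) (fuel : Nat) (l cur : List Char)
    (acc : List (List Char)) :
    ∃ ch ∈ PySem.Chars.splitOn.go sep fuel l cur acc, cur.reverse <+: ch := by
  induction fuel generalizing l cur acc with
  | zero =>
    refine ⟨cur.reverse ++ l, ?_, List.prefix_append _ _⟩
    simp [PySem.Chars.splitOn.go]
  | succ f ih =>
    cases l with
    | nil => exact ⟨cur.reverse, by simp [PySem.Chars.splitOn.go], List.prefix_refl _⟩
    | cons c rest =>
      rw [PySem.Chars.splitOn.go]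
      split
      · exact ⟨cur.reverse,
          pv_go_acc_mem _ _ _ _ _ _ (List.mem_cons_self), List.prefix_refl _⟩
      · obtain ⟨ch, hm, hp⟩ := ih rest (c :: cur) acc
        refine ⟨ch, hm, ?_⟩
        have : cur.reverse <+: (c :: cur).reverse := by
          simp [List.reverse_cons]
        exact this.trans hp
-- a stripped nonempty string starts with a non-whitespace character
theorem pv_strip_head (ls : List Char) (c : Char) (rest : List Char)
    (h : PySem.Chars.strip ls = c :: rest) : PySem.Chars.isspace c = false := by
  have hpre : (c :: rest) <+: PySem.Chars.lstrip ls := by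
    rw [← h]
    unfold PySem.Chars.strip PySem.Chars.rstrip
    have hsuf := List.dropWhile_suffix (l := (PySem.Chars.lstrip ls).reverse) PySem.Chars.isspace
    have := List.reverse_prefix.mpr (by simpa using hsuf)
    simpa using this
  obtain ⟨t, ht⟩ := hpre
  unfold PySem.Chars.lstrip at ht
  have hne : List.dropWhile PySem.Chars.isspace ls ≠ [] := by rw [← ht]; simp
  have := List.head_dropWhile_not PySem.Chars.isspace hne
  rwa [show (List.dropWhile PySem.Chars.isspace ls).head hne = c from by
    simp [← ht]] at this

-- splitting a string starting with a non-space character yields a nonempty chunk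
theorem pv_split_nonempty (c : Char) (rest : List Char)
    (hc : PySem.Chars.isspace c = false) :
    ∃ ch ∈ PySem.Chars.splitOn (c :: rest) " ".toList, ch ≠ [] := by
  have hcne : c ≠ ' ' := by
    intro h; rw [h] at hc; exact absurd hc (by decide)
  unfold PySem.Chars.splitOn
  rw [show (c :: rest).length + 1 = (rest.length + 1) + 1 from by simp]
  rw [PySem.Chars.splitOn.go]
  have hpf : (" ".toList).isPrefixOf (c :: rest) = false := by
    simp [List.isPrefixOf]
    exact fun h => hcne h.symm
  simp only [hpf, Bool.false_eq_true, if_false]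
  obtain ⟨ch, hm, hp⟩ := pv_go_exists " ".toList (rest.length + 1) rest [c] []
  exact ⟨ch, hm, fun hnil => by simp [hnil] at hp⟩

-- ===== VERDICT (by name: the statement is the Claim_ definition above) =====
theorem check_empty_spaces_spec : Claim_equal_check_empty_spaces := by
  intro string _
  unfold Spec_check_empty_spaces check_empty_spaces check_empty_spaces_alt
  cases h : PySem.Chars.strip string.toList with
  | nil =>
    have hs : PySem.Str.strip string = "" := by
      rw [PySem.Str.strip, h]
    simp only [hs]
    decide
  | cons c rest =>
    have hs : (PySem.Str.strip string).toList = c :: rest := by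
      rw [PySem.Str.toList_strip, h]
    have hne : PySem.Str.strip string ≠ "" := by
      intro he; rw [he] at hs; simp at hs
    simp only [hs, pv_foldl_count, zero_add]
    rw [if_neg, if_neg hne]
    intro heq
    have hcount : (((PySem.Chars.splitOn (c :: rest) " ".toList).map
        String.ofList).countP (fun i => decide (PySem.Str.len i = 0)))
        = ((PySem.Chars.splitOn (c :: rest) " ".toList).map String.ofList).length := by
      simpa using heq
    have hall := List.countP_eq_length.mp hcount
    obtain ⟨ch, hm, hnil⟩ := pv_split_nonempty c rest (pv_strip_head _ _ _ h)
    have := hall (String.ofList ch) (List.mem_map_of_mem hm)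
    simp [PySem.Str.len] at this
    exact hnil this
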